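-- pv_equiv track=rewrite | github.com/atamalakrah/Advent-of-Code-2023 | Day 13/correct.py | find_mirror_index
-- ===== SOURCE A (Python) =====
-- def find_mirror_index(grid):
--     for i in range(1, len(grid)):
--         top_half = grid[:i][::-1]
--         bottom_half = grid[i:]
--
--         top_half = top_half[:len(bottom_half)]
--         bottom_half = bottom_half[:len(top_half)]
--
--         if top_half == bottom_half:
--             return i
--
--     return 0
-- ===== SOURCE B (Python) =====
-- def find_mirror_index(grid):
--     n = len(grid)
--     i = 1
--     while i < n:
--         l, r = i - 1, i
--         while l >= 0 and r < n and grid[l] == grid[r]: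
--             l -= 1
--             r += 1
--         if l < 0 or r == n:
--             return i
--         i += 1
--     return 0
-- ===== Notes on version B (the rewrite author's own statement) =====
-- stated objective: faster
-- what changed: Replaces per-split list slicing, reversal and whole-slice comparison with an in-place two-pointer expansion from each split that compares rows by index and stops at the first mismatching pair, building no intermediate lists.
import Mathlib
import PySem

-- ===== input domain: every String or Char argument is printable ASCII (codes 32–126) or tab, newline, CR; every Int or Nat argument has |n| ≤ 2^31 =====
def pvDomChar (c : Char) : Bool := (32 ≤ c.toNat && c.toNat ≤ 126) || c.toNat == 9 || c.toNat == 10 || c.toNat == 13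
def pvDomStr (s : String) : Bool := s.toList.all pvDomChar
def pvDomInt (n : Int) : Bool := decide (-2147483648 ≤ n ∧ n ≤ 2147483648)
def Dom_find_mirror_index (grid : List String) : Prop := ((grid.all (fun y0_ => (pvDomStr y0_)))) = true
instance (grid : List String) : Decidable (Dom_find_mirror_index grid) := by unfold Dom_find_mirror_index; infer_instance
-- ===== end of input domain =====

-- B replaces A's per-split slicing, reversal and whole-slice comparison by an index-based
-- two-pointer expansion from each split that stops at the first mismatching row pair
-- (alternative decomposition: no intermediate lists are built).

-- ===== PORT A =====
-- loop body of "for i in range(1, len(grid))" with early return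
def findMirrorGoA (grid : List String) : List Int → Int
  | [] => 0
  | i :: rest =>
      let topHalf0 := PySem.List.slice grid none (some i)                       -- grid[:i]
      let topHalf1 := (PySem.List.slice? topHalf0 none none (-1)).getD []       -- [::-1] (step ≠ 0, never none)
      let bottomHalf0 := PySem.List.slice grid (some i) none                    -- grid[i:]
      let topHalf := PySem.List.slice topHalf1 none (some (bottomHalf0.length : Int))
      let bottomHalf := PySem.List.slice bottomHalf0 none (some (topHalf.length : Int))
      if topHalf = bottomHalf then i else findMirrorGoA grid rest

def find_mirror_index (grid : List String) : Int :=
  findMirrorGoA grid (PySem.List.pyRange 1 (grid.length : Int) 1)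

-- ===== PORT B =====
-- inner "while l >= 0 and r < n and grid[l] == grid[r]: l -= 1; r += 1"
def pvExpand (grid : List String) (l r : Int) : Int × Int :=
  if h : 0 ≤ l ∧ r < (grid.length : Int) then
    if PySem.List.pyGet? grid l = PySem.List.pyGet? grid r then
      pvExpand grid (l - 1) (r + 1)
    else (l, r)
  else (l, r)
termination_by ((grid.length : Int) - r).toNat
decreasing_by omega

-- outer "while i < n" loop with early return
def findMirrorGoB (grid : List String) (i : Int) : Int :=
  if h : i < (grid.length : Int) then
    let p := pvExpand grid (i - 1) i
    if p.1 < 0 ∨ p.2 = (grid.length : Int) then i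
    else findMirrorGoB grid (i + 1)
  else 0
termination_by ((grid.length : Int) - i).toNat
decreasing_by omega

def find_mirror_index_alt (grid : List String) : Int :=
  findMirrorGoB grid 1

-- ===== PRECONDITION & SPEC =====
def Spec_find_mirror_index (grid : List String) (out : Int) : Prop := out = find_mirror_index_alt grid
instance (grid : List String) (out : Int) : Decidable (Spec_find_mirror_index grid out) := by unfold Spec_find_mirror_index; infer_instance

-- ===== CLAIM (what is proved, stated in full; the proofs are below) =====
def Claim_equal_find_mirror_index : Prop := ∀ (grid : List String), Dom_find_mirror_index grid → Spec_find_mirror_index grid (find_mirror_index grid)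

-- ===== LEMMAS AND PROOFS =====

-- B's two-pointer loop runs off an end iff every in-range mirrored pair of rows matches
theorem pvExpand_good_iff (grid : List String) (l r : Int) (hr : r ≤ (grid.length : Int)) :
    ((pvExpand grid l r).1 < 0 ∨ (pvExpand grid l r).2 = (grid.length : Int)) ↔
      (∀ k : Nat, 0 ≤ l - k → r + k < (grid.length : Int) →
        PySem.List.pyGet? grid (l - k) = PySem.List.pyGet? grid (r + k)) := by
  generalize hm : ((grid.length : Int) - r).toNat = m
  induction m generalizing l r with
  | zero =>
    have hr' : r = (grid.length : Int) := by omega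
    rw [pvExpand, dif_neg (by omega)]
    constructor
    · intro _ k _ hk2; omega
    · intro _; right; exact hr'
  | succ m ih =>
    rw [pvExpand]
    by_cases hc : 0 ≤ l ∧ r < (grid.length : Int)
    · rw [dif_pos hc]
      by_cases heq : PySem.List.pyGet? grid l = PySem.List.pyGet? grid r
      · rw [if_pos heq, ih (l - 1) (r + 1) (by omega) (by omega)]
        constructor
        · intro H k hk1 hk2
          cases k with
          | zero => simpa using heq
          | succ k =>
            have e1 : l - ((k + 1 : Nat) : Int) = (l - 1) - k := by push_cast; ring
            have e2 : r + ((k + 1 : Nat) : Int) = (r + 1) + k := by push_cast; ring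
            rw [e1, e2]
            exact H k (by rw [← e1]; exact_mod_cast hk1) (by rw [← e2]; exact_mod_cast hk2)
        · intro H k hk1 hk2
          have e1 : (l - 1) - (k : Int) = l - ((k + 1 : Nat) : Int) := by push_cast; ring
          have e2 : (r + 1) + (k : Int) = r + ((k + 1 : Nat) : Int) := by push_cast; ring
          rw [e1, e2]
          exact H (k + 1) (by rw [← e1]; exact hk1) (by rw [← e2]; exact hk2)
      · rw [if_neg heq]
        constructor
        · intro h; exfalso; rcases h with h | h <;> omega
        · intro H; exfalso; exact heq (by simpa using H 0 (by omega) (by omega))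
    · rw [dif_neg hc]
      constructor
      · intro _ k hk1 hk2; omega
      · intro _; omega

-- A's slice condition at a split equals that pairwise condition
theorem sliceEq_iff (grid : List String) (i : Int) (h1 : 1 ≤ i) (h2 : i < (grid.length : Int)) :
    (let topHalf0 := PySem.List.slice grid none (some i)
     let topHalf1 := (PySem.List.slice? topHalf0 none none (-1)).getD []
     let bottomHalf0 := PySem.List.slice grid (some i) none
     let topHalf := PySem.List.slice topHalf1 none (some (bottomHalf0.length : Int))
     let bottomHalf := PySem.List.slice bottomHalf0 none (some (topHalf.length : Int))
     topHalf = bottomHalf) ↔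
      (∀ k : Nat, 0 ≤ (i - 1) - k → i + k < (grid.length : Int) →
        PySem.List.pyGet? grid ((i - 1) - k) = PySem.List.pyGet? grid (i + k)) := by
  obtain ⟨j, rfl⟩ : ∃ j : Nat, i = (j : Int) := ⟨i.toNat, by omega⟩
  have hj1 : 1 ≤ j := by omega
  have hjn : j < grid.length := by omega
  simp only [PySem.List.slice_to_natCast, PySem.List.slice_from_natCast,
    PySem.List.slice?_none_none_neg_one, Option.getD_some]
  have p1 : ∀ k : Nat, k ≤ j - 1 →
      PySem.List.pyGet? grid ((j : Int) - 1 - k) = grid[j - 1 - k]? := by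
    intro k hk
    have h0 : (0 : Int) ≤ (j : Int) - 1 - k := by omega
    rw [PySem.List.pyGet?_of_nonneg grid h0]
    have e : ((j : Int) - 1 - k).toNat = j - 1 - k := by omega
    rw [e]
  have p2 : ∀ k : Nat,
      PySem.List.pyGet? grid ((j : Int) + k) = grid[j + k]? := by
    intro k
    have h0 : (0 : Int) ≤ (j : Int) + k := by omega
    rw [PySem.List.pyGet?_of_nonneg grid h0]
    have e : ((j : Int) + k).toNat = j + k := by omega
    rw [e]
  constructor
  · intro hEq k hk1 hk2
    have hkj : k ≤ j - 1 := by omega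
    have hkn : j + k < grid.length := by omega
    have hklen : k < ((grid.take j).reverse.take (grid.drop j).length).length := by
      simp only [List.length_take, List.length_reverse, List.length_drop]; omega
    have hg := List.getElem_of_eq hEq hklen
    simp only [List.getElem_take, List.getElem_reverse, List.getElem_drop,
      List.length_take, List.length_reverse, List.length_drop] at hg
    have hg' : grid[j - 1 - k]'(by omega) = grid[j + k]'(by omega) := by
      have e : min j grid.length - 1 - k = j - 1 - k := by omega
      simpa [e] using hg
    rw [p1 k hkj, p2 k, List.getElem?_eq_getElem (by omega), List.getElem?_eq_getElem (by omega)]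
    exact congrArg some hg'
  · intro H
    apply List.ext_getElem
    · simp only [List.length_take, List.length_reverse, List.length_drop]; omega
    · intro k hk1 hk2
      have hkm : k < min (grid.length - j) j := by
        simp only [List.length_take, List.length_reverse, List.length_drop] at hk1
        omega
      have hydr := H k (by omega) (by omega)
      rw [p1 k (by omega), p2 k, List.getElem?_eq_getElem (by omega),
        List.getElem?_eq_getElem (by omega)] at hydr
      have hg' : grid[j - 1 - k]'(by omega) = grid[j + k]'(by omega) := Option.some.inj hydr
      simp only [List.getElem_take, List.getElem_reverse, List.getElem_drop,
        List.length_take, List.length_reverse, List.length_drop]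
      have e : min j grid.length - 1 - k = j - 1 - k := by omega
      simpa [e] using hg'

-- both loops agree from any start 1 ≤ i
theorem go_eq (grid : List String) (i : Int) (h1 : 1 ≤ i) :
    findMirrorGoA grid (PySem.List.pyRange i (grid.length : Int) 1) = findMirrorGoB grid i := by
  generalize hm : ((grid.length : Int) - i).toNat = m
  induction m generalizing i with
  | zero =>
    rw [PySem.List.pyRange_one_eq_nil (by omega), findMirrorGoA, findMirrorGoB, dif_neg (by omega)]
  | succ m ih =>
    have hi : i < (grid.length : Int) := by omega
    rw [PySem.List.pyRange_one_cons hi, findMirrorGoB, dif_pos hi]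
    show (let topHalf0 := PySem.List.slice grid none (some i)
          let topHalf1 := (PySem.List.slice? topHalf0 none none (-1)).getD []
          let bottomHalf0 := PySem.List.slice grid (some i) none
          let topHalf := PySem.List.slice topHalf1 none (some (bottomHalf0.length : Int))
          let bottomHalf := PySem.List.slice bottomHalf0 none (some (topHalf.length : Int))
          if topHalf = bottomHalf then i
          else findMirrorGoA grid (PySem.List.pyRange (i + 1) (grid.length : Int) 1)) = _
    have hiff := (sliceEq_iff grid i h1 hi).trans
      (pvExpand_good_iff grid (i - 1) i (by omega)).symm
    by_cases hB : (pvExpand grid (i - 1) i).1 < 0 ∨ (pvExpand grid (i - 1) i).2 = (grid.length : Int)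
    · simp only [if_pos (hiff.mpr hB), if_pos hB]
    · simp only [if_neg (fun hA => hB (hiff.mp hA)), if_neg hB]
      exact ih (i + 1) (by omega) (by omega)

-- ===== VERDICT (by name: the statement is the Claim_ definition above) =====
theorem find_mirror_index_spec : Claim_equal_find_mirror_index := by
  intro grid _
  unfold Spec_find_mirror_index find_mirror_index find_mirror_index_alt
  exact go_eq grid 1 le_rfl
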